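-- pv_equiv track=rewrite | github.com/koroshgodarzi/DB-agent | agent/run_sql_query.py | is_readonly_query
-- ===== SOURCE A (Python) =====
-- def is_readonly_query(query: str) -> bool:
--     """
--     Validate that the query is read-only (SELECT only).
--
--     Args:
--         query: SQL query string
--
--     Returns:
--         True if the query is read-only, False otherwise
--     """
--     # Remove comments and normalize whitespace
--     query_clean = " ".join(query.split())
--     query_upper = query_clean.upper().strip()
--
--     # Check if query starts with SELECT
--     if not query_upper.startswith("SELECT"):
--         return False
--
--     # List of potentially dangerous SQL keywords that modify data
--     dangerous_keywords = [
--         "INSERT", "UPDATE", "DELETE", "DROP", "CREATE", "ALTER",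
--         "TRUNCATE", "GRANT", "REVOKE", "EXEC", "EXECUTE"
--     ]
--
--     # Check for dangerous keywords (excluding SELECT)
--     for keyword in dangerous_keywords:
--         # Use word boundaries to avoid false positives
--         if f" {keyword} " in query_upper or query_upper.endswith(f" {keyword}"):
--             return False
--
--     return True
-- ===== SOURCE B (Python) =====
-- _DANGEROUS = frozenset(
--     "INSERT UPDATE DELETE DROP CREATE ALTER TRUNCATE GRANT REVOKE EXEC EXECUTE".split()
-- )
--
--
-- def is_readonly_query(query: str) -> bool:
--     """Read-only (SELECT-only) check: tokenize once, one set-disjointness test."""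
--     tokens = query.upper().split()
--     return bool(tokens) and tokens[0].startswith("SELECT") and _DANGEROUS.isdisjoint(tokens)
-- ===== Notes on version B (the rewrite author's own statement) =====
-- stated objective: idiomatic
-- what changed: Replaces A's staged normalization (join(split), upper, strip) and per-keyword space-delimited substring scan with a single tokenization (upper().split()) followed by one frozenset-disjointness test against the dangerous keywords (the set itself built by splitting one literal); the SELECT check keeps its prefix (not token) semantics on the first token.
import Mathlib
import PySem

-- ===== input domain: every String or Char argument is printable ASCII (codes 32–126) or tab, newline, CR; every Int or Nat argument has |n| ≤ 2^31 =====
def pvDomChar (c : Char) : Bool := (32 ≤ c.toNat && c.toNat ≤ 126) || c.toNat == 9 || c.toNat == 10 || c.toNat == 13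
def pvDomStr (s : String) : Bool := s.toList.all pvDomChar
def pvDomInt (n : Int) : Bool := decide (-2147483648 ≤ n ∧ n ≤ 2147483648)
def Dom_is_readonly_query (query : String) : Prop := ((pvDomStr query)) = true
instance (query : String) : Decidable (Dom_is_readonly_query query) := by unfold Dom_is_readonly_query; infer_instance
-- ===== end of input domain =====

-- B replaces A's staged normalization and per-keyword substring scan with one tokenization plus a set-disjointness test (idiomatic; return value only, no side effects).

-- ===== PORT A =====
def pvSELECT : List Char := ['S','E','L','E','C','T']

def pvDangerousA : List (List Char) :=
  [['I','N','S','E','R','T'], ['U','P','D','A','T','E'], ['D','E','L','E','T','E'],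
   ['D','R','O','P'], ['C','R','E','A','T','E'], ['A','L','T','E','R'],
   ['T','R','U','N','C','A','T','E'], ['G','R','A','N','T'], ['R','E','V','O','K','E'],
   ['E','X','E','C'], ['E','X','E','C','U','T','E']]

def is_readonly_query (query : String) : Bool :=
  -- query_clean = " ".join(query.split()); query_upper = query_clean.upper().strip()
  let query_clean := PySem.Chars.join [' '] (PySem.Chars.split₀ query.toList)
  let query_upper := PySem.Chars.strip (PySem.Chars.upper query_clean)
  if !PySem.Chars.startswith query_upper pvSELECT then false
  else if pvDangerousA.any (fun kw =>
      -- f" {keyword} " in query_upper or query_upper.endswith(f" {keyword}")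
      PySem.Chars.isIn ((' ' :: kw) ++ [' ']) query_upper
      || PySem.Chars.endswith query_upper (' ' :: kw)) then false
  else true

-- ===== PORT B =====
-- _DANGEROUS = frozenset("INSERT UPDATE ... EXECUTE".split())
def pvDangerousB : PySem.Set (List Char) :=
  PySem.Set.ofList (PySem.Chars.split₀
    "INSERT UPDATE DELETE DROP CREATE ALTER TRUNCATE GRANT REVOKE EXEC EXECUTE".toList)

def is_readonly_query_alt (query : String) : Bool :=
  -- tokens = query.upper().split(); bool(tokens) and tokens[0].startswith("SELECT") and _DANGEROUS.isdisjoint(tokens)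
  let tokens := PySem.Chars.split₀ (PySem.Chars.upper query.toList)
  !tokens.isEmpty
    && PySem.Chars.startswith (tokens.headD []) "SELECT".toList
    && PySem.Set.isdisjoint pvDangerousB tokens

-- ===== PRECONDITION & SPEC =====
def Spec_is_readonly_query (query : String) (out : Bool) : Prop := out = is_readonly_query_alt query
instance (query : String) (out : Bool) : Decidable (Spec_is_readonly_query query out) := by unfold Spec_is_readonly_query; infer_instance

-- ===== CLAIM (what is proved, stated in full; the proofs are below) =====
def Claim_equal_is_readonly_query : Prop := ∀ (query : String), Dom_is_readonly_query query → Spec_is_readonly_query query (is_readonly_query query)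

-- ===== LEMMAS AND PROOFS =====

lemma pv_isspace_upperChar (c : Char) :
    PySem.Chars.isspace (PySem.Chars.upperChar c) = PySem.Chars.isspace c := by
  unfold PySem.Chars.upperChar
  split
  · rename_i h
    have hl : 97 ≤ c.toNat ∧ c.toNat ≤ 122 := by
      simpa [PySem.Chars.islower] using h
    have hv : (Char.ofNat (c.toNat - 32)).toNat = c.toNat - 32 := by
      have : (c.toNat - 32).isValidChar := Or.inl (by omega)
      simp [Char.ofNat, this]
    have h1 : PySem.Chars.isspace (Char.ofNat (c.toNat - 32)) = false := by
      simp [PySem.Chars.isspace, hv]; omega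
    have h2 : PySem.Chars.isspace c = false := by
      simp [PySem.Chars.isspace]; omega
    rw [h1, h2]
  · rfl

lemma pv_split_go_map (s : List Char) :
    ∀ (cur : List Char) (acc : List (List Char)),
    PySem.Chars.split₀.go (s.map PySem.Chars.upperChar) (cur.map PySem.Chars.upperChar)
        (acc.map (List.map PySem.Chars.upperChar))
      = (PySem.Chars.split₀.go s cur acc).map (List.map PySem.Chars.upperChar) := by
  induction s with
  | nil =>
    intro cur acc
    simp only [List.map_nil, PySem.Chars.split₀.go]
    cases hc : cur.isEmpty <;>
      simp [hc, List.isEmpty_map, List.map_reverse]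
  | cons c s ih =>
    intro cur acc
    simp only [List.map_cons, PySem.Chars.split₀.go, pv_isspace_upperChar]
    cases hsp : PySem.Chars.isspace c
    · simpa using ih (c :: cur) acc
    · cases hc : cur.isEmpty
      · simp only [List.isEmpty_map, hc]
        have := ih [] (cur.reverse :: acc)
        simpa [List.map_reverse] using this
      · simpa [List.isEmpty_map, hc] using ih [] acc

lemma pv_split₀_upper (cs : List Char) :
    PySem.Chars.split₀ (PySem.Chars.upper cs) = (PySem.Chars.split₀ cs).map PySem.Chars.upper := by
  have := pv_split_go_map cs [] []
  simpa [PySem.Chars.split₀, PySem.Chars.upper] using this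

lemma pv_go_tokens (s : List Char) :
    ∀ (cur : List Char) (acc : List (List Char)),
    (∀ c ∈ cur, PySem.Chars.isspace c = false) →
    (∀ w ∈ acc, w ≠ [] ∧ ∀ c ∈ w, PySem.Chars.isspace c = false) →
    ∀ w ∈ PySem.Chars.split₀.go s cur acc, w ≠ [] ∧ ∀ c ∈ w, PySem.Chars.isspace c = false := by
  induction s with
  | nil =>
    intro cur acc hcur hacc
    simp only [PySem.Chars.split₀.go]
    cases hc : cur.isEmpty
    · simp only [if_false, Bool.false_eq_true]
      intro w hw
      simp only [List.mem_reverse, List.mem_cons] at hw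
      rcases hw with h | h
      · rcases h with rfl
        constructor
        · simp at hc; simpa using hc
        · intro d hd; exact hcur d (by simpa using hd)
      · exact hacc w h
    · intro w hw
      simp only [if_true, List.mem_reverse] at hw
      exact hacc w (by simpa using hw)
  | cons c s ih =>
    intro cur acc hcur hacc
    simp only [PySem.Chars.split₀.go]
    cases hsp : PySem.Chars.isspace c
    · simp only [if_false, Bool.false_eq_true]
      exact ih (c :: cur) acc
        (by intro d hd; rcases List.mem_cons.mp hd with rfl | hd; exact hsp; exact hcur d hd)
        hacc
    · simp only [if_true]
      cases hc : cur.isEmpty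
      · simp only [Bool.false_eq_true, if_false]
        refine ih [] (cur.reverse :: acc) (by simp) ?_
        intro w hw
        rcases List.mem_cons.mp hw with rfl | hw
        · constructor
          · simp at hc; simpa using hc
          · intro d hd; exact hcur d (by simpa using hd)
        · exact hacc w hw
      · simp only [if_true]
        exact ih [] acc (by simp) hacc

lemma pv_split₀_tokens (cs : List Char) :
    ∀ w ∈ PySem.Chars.split₀ cs, w ≠ [] ∧ ∀ c ∈ w, PySem.Chars.isspace c = false :=
  pv_go_tokens cs [] [] (by simp) (by simp)

lemma pv_upper_join (us : List (List Char)) :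
    PySem.Chars.upper (PySem.Chars.join [' '] us)
      = PySem.Chars.join [' '] (us.map PySem.Chars.upper) := by
  induction us with
  | nil => simp [PySem.Chars.join_nil, PySem.Chars.upper]
  | cons a us ih =>
    cases us with
    | nil => simp [PySem.Chars.join_singleton]
    | cons b l =>
      rw [PySem.Chars.join_cons_cons, List.map_cons, List.map_cons, PySem.Chars.join_cons_cons, ← List.map_cons, ← ih]
      have hsp : PySem.Chars.upper [' '] = [' '] := by decide
      simp [PySem.Chars.upper] at hsp ⊢
      simp [hsp]

lemma pv_rev_join : ∀ us : List (List Char), us ≠ [] → (∀ w ∈ us, w ≠ []) →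
    ∃ c r, (PySem.Chars.join [' '] us).reverse = c :: r ∧ ∃ t ∈ us, c ∈ t := by
  intro us
  induction us with
  | nil => intro h; exact absurd rfl h
  | cons t us ih =>
    intro _ hne
    cases us with
    | nil =>
      have ht : t ≠ [] := hne t (by simp)
      cases hrev : t.reverse with
      | nil => exact absurd (List.reverse_eq_nil_iff.mp hrev) ht
      | cons c r =>
        refine ⟨c, r, by simpa [PySem.Chars.join_singleton] using hrev, t, by simp, ?_⟩
        have : c ∈ t.reverse := by rw [hrev]; simp
        simpa using this
    | cons u l =>
      obtain ⟨c, r, hrev, t', ht', hc⟩ := ih (by simp) (fun w hw => hne w (by simp [hw]))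
      refine ⟨c, r ++ [' '] ++ t.reverse, ?_, t', by simp [ht'], hc⟩
      rw [PySem.Chars.join_cons_cons]
      simp [hrev]

lemma pv_strip_join (us : List (List Char))
    (h : ∀ w ∈ us, w ≠ [] ∧ ∀ c ∈ w, PySem.Chars.isspace c = false) :
    PySem.Chars.strip (PySem.Chars.join [' '] us) = PySem.Chars.join [' '] us := by
  cases us with
  | nil => simp [PySem.Chars.join_nil, PySem.Chars.strip, PySem.Chars.lstrip, PySem.Chars.rstrip]
  | cons t0 rest =>
    obtain ⟨hne, hsp⟩ := h t0 (by simp)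
    obtain ⟨X, hX⟩ : ∃ X, PySem.Chars.join [' '] (t0 :: rest) = t0 ++ X := by
      cases rest with
      | nil => exact ⟨[], by simp [PySem.Chars.join_singleton]⟩
      | cons u l => exact ⟨' ' :: PySem.Chars.join [' '] (u :: l), by rw [PySem.Chars.join_cons_cons]; simp⟩
    cases t0 with
    | nil => exact absurd rfl hne
    | cons c t0' =>
      have hc : PySem.Chars.isspace c = false := hsp c (by simp)
      have hl : PySem.Chars.lstrip (PySem.Chars.join [' '] ((c :: t0') :: rest))
          = PySem.Chars.join [' '] ((c :: t0') :: rest) := by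
        rw [hX]
        simp [PySem.Chars.lstrip, hc]
      obtain ⟨d, r, hrev, t, ht, hd⟩ := pv_rev_join ((c :: t0') :: rest) (by simp)
        (fun w hw => (h w hw).1)
      have hdns : PySem.Chars.isspace d = false := (h t ht).2 d hd
      unfold PySem.Chars.strip
      rw [hl]
      unfold PySem.Chars.rstrip
      rw [hrev]
      simp only [List.dropWhile_cons, hdns, Bool.false_eq_true, if_false]
      rw [← hrev, List.reverse_reverse]

lemma pv_prefix_sep (t : List Char) (s p : List Char) (hp : ' ' ∉ p) :
    (p <+: t ++ ' ' :: s) ↔ p <+: t := by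
  induction t generalizing p with
  | nil =>
    cases p with
    | nil => simp
    | cons c p' =>
      have hc : c ≠ ' ' := fun h => hp (h ▸ List.mem_cons_self)
      simp only [List.nil_append, List.cons_prefix_cons]
      constructor
      · rintro ⟨h, -⟩; exact absurd h hc
      · intro h; exact absurd (List.prefix_nil.mp h) (by simp)
  | cons d t' ih =>
    cases p with
    | nil => simp
    | cons c p' =>
      have hp' : ' ' ∉ p' := fun h => hp (List.mem_cons_of_mem _ h)
      simp only [List.cons_append, List.cons_prefix_cons]
      rw [ih p' hp']

lemma pv_prefix_token (kw : List Char) :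
    ∀ (t : List Char), ' ' ∉ kw → ' ' ∉ t →
    ∀ s, ((kw ++ [' ']) <+: t ++ ' ' :: s) ↔ kw = t := by
  induction kw with
  | nil =>
    intro t _ ht s
    cases t with
    | nil => simp
    | cons d t' =>
      have hd : d ≠ ' ' := fun h => ht (h ▸ List.mem_cons_self)
      simp [List.cons_prefix_cons]
      intro h; exact absurd h.symm hd
  | cons c kw' ih =>
    intro t hkw ht s
    have hc : c ≠ ' ' := fun h => hkw (h ▸ List.mem_cons_self)
    cases t with
    | nil =>
      simp only [List.nil_append, List.cons_append, List.cons_prefix_cons]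
      constructor
      · rintro ⟨h, -⟩; exact absurd h hc
      · intro h; exact absurd h (by simp)
    | cons d t' =>
      simp only [List.cons_append, List.cons_prefix_cons, List.cons.injEq]
      rw [ih t' (fun h => hkw (List.mem_cons_of_mem _ h)) (fun h => ht (List.mem_cons_of_mem _ h)) s]

lemma pv_suffix_sep (t : List Char) (ht : ' ' ∉ t) (u s : List Char) :
    ((' ' :: u) <:+ t ++ ' ' :: s) ↔ (u = s ∨ (' ' :: u) <:+ s) := by
  induction t with
  | nil => simp [List.suffix_cons_iff]
  | cons d t' ih =>
    have hd : d ≠ ' ' := fun h => ht (h ▸ List.mem_cons_self)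
    rw [List.cons_append, List.suffix_cons_iff]
    rw [ih (fun h => ht (List.mem_cons_of_mem _ h))]
    constructor
    · rintro (h | h)
      · exact absurd (by injection h with h1 _; exact h1.symm) hd
      · exact h
    · intro h; exact Or.inr h

lemma pv_infix_sep (t : List Char) (ht : ' ' ∉ t) (v s : List Char) :
    ((' ' :: v) <:+: t ++ ' ' :: s) ↔ (v <+: s ∨ (' ' :: v) <:+: s) := by
  induction t with
  | nil => simp [List.infix_cons_iff, List.cons_prefix_cons]
  | cons d t' ih =>
    have hd : d ≠ ' ' := fun h => ht (h ▸ List.mem_cons_self)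
    rw [List.cons_append, List.infix_cons_iff]
    rw [ih (fun h => ht (List.mem_cons_of_mem _ h))]
    constructor
    · rintro (h | h)
      · rcases List.cons_prefix_cons.mp h with ⟨h1, -⟩; exact absurd h1.symm hd
      · exact h
    · intro h; exact Or.inr h

lemma pv_danger_aux (kw : List Char) (hsp : ' ' ∉ kw) :
    ∀ us : List (List Char), us ≠ [] → (∀ w ∈ us, w ≠ [] ∧ ' ' ∉ w) →
      (((((' ' :: kw) ++ [' ']) <:+: PySem.Chars.join [' '] us)
        ∨ ((' ' :: kw) <:+ PySem.Chars.join [' '] us))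
      ↔ kw ∈ us.tail) := by
  intro us
  induction us with
  | nil => intro h; exact absurd rfl h
  | cons t0 us ih =>
    intro _ h
    obtain ⟨ht0ne, ht0sp⟩ := h t0 (by simp)
    cases us with
    | nil =>
      rw [PySem.Chars.join_singleton]
      simp only [List.tail_cons, List.not_mem_nil, iff_false]
      rintro (hin | hin)
      · exact ht0sp (hin.subset (by simp))
      · exact ht0sp (hin.isInfix.subset (by simp))
    | cons t1 rest =>
      obtain ⟨ht1ne, ht1sp⟩ := h t1 (by simp)
      rw [PySem.Chars.join_cons_cons]
      have harr : t0 ++ [' '] ++ PySem.Chars.join [' '] (t1 :: rest)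
          = t0 ++ ' ' :: PySem.Chars.join [' '] (t1 :: rest) := by simp
      rw [harr]
      rw [List.cons_append, pv_infix_sep t0 ht0sp, pv_suffix_sep t0 ht0sp]
      have hih := ih (by simp) (fun w hw => h w (by simp [hw]))
      simp only [List.tail_cons] at hih ⊢
      have hhead : ((kw ++ [' ']) <+: PySem.Chars.join [' '] (t1 :: rest)
          ∨ kw = PySem.Chars.join [' '] (t1 :: rest)) ↔ kw = t1 := by
        cases rest with
        | nil =>
          rw [PySem.Chars.join_singleton]
          constructor
          · rintro (hp | hp)
            · exact absurd (hp.subset (by simp)) ht1sp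
            · exact hp
          · intro hp; exact Or.inr hp
        | cons t2 rest' =>
          rw [PySem.Chars.join_cons_cons]
          have harr2 : t1 ++ [' '] ++ PySem.Chars.join [' '] (t2 :: rest')
              = t1 ++ ' ' :: PySem.Chars.join [' '] (t2 :: rest') := by simp
          rw [harr2]
          constructor
          · rintro (hp | hp)
            · exact (pv_prefix_token kw t1 hsp ht1sp _).mp hp
            · exact absurd (hp ▸ (by simp : ' ' ∈ t1 ++ ' ' :: PySem.Chars.join [' '] (t2 :: rest'))) (hp ▸ hsp)
          · intro hp
            exact Or.inl ((pv_prefix_token kw t1 hsp ht1sp _).mpr hp)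
      rw [List.mem_cons]
      constructor
      · rintro (⟨hp | hp⟩ | ⟨hp | hp⟩)
        · exact Or.inl (hhead.mp (Or.inl hp))
        · exact Or.inr (hih.mp (Or.inl hp))
        · exact Or.inl (hhead.mp (Or.inr hp))
        · exact Or.inr (hih.mp (Or.inr hp))
      · rintro (hp | hp)
        · rcases hhead.mpr hp with h1 | h1
          · exact Or.inl (Or.inl h1)
          · exact Or.inr (Or.inl h1)
        · rcases hih.mpr hp with h1 | h1
          · exact Or.inl (Or.inr h1)
          · exact Or.inr (Or.inr h1)

-- ===== VERDICT (by name: the statement is the Claim_ definition above) =====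
theorem is_readonly_query_spec : Claim_equal_is_readonly_query := by
  intro q _
  unfold Spec_is_readonly_query
  simp only [is_readonly_query, is_readonly_query_alt]
  rw [pv_upper_join]
  have htok := pv_split₀_tokens q.toList
  have hust : ∀ w ∈ (PySem.Chars.split₀ q.toList).map PySem.Chars.upper,
      w ≠ [] ∧ ∀ c ∈ w, PySem.Chars.isspace c = false := by
    intro w hw
    obtain ⟨w', hw', rfl⟩ := List.mem_map.mp hw
    obtain ⟨h1, h2⟩ := htok w' hw'
    refine ⟨by simpa [PySem.Chars.upper] using h1, ?_⟩
    intro c hc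
    simp only [PySem.Chars.upper, List.mem_map] at hc
    obtain ⟨c', hc', rfl⟩ := hc
    rw [pv_isspace_upperChar]; exact h2 c' hc'
  rw [pv_strip_join _ hust, pv_split₀_upper]
  revert hust
  generalize (PySem.Chars.split₀ q.toList).map PySem.Chars.upper = us
  intro hust
  cases us with
  | nil => decide
  | cons t0 rest =>
    obtain ⟨ht0ne, ht0sp⟩ := hust t0 (by simp)
    have hsel : ("SELECT".toList : List Char) = pvSELECT := rfl
    have hswlem : PySem.Chars.startswith (PySem.Chars.join [' '] (t0 :: rest)) pvSELECT
        = PySem.Chars.startswith t0 pvSELECT := by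
      cases rest with
      | nil => rw [PySem.Chars.join_singleton]
      | cons t1 r =>
        rw [PySem.Chars.join_cons_cons]
        have harr : t0 ++ [' '] ++ PySem.Chars.join [' '] (t1 :: r)
            = t0 ++ ' ' :: PySem.Chars.join [' '] (t1 :: r) := by simp
        rw [harr]
        simp only [PySem.Chars.startswith]
        rw [Bool.eq_iff_iff]
        simp only [List.isPrefixOf_iff_prefix]
        exact pv_prefix_sep t0 _ pvSELECT (by decide)
    rw [hswlem]
    cases hsw : PySem.Chars.startswith t0 pvSELECT
    · simp [List.headD, hsel, hsw]
    · simp only [hsw, Bool.not_true, Bool.false_eq_true, if_false, List.headD, List.isEmpty_cons,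
        Bool.not_false, hsel, Bool.true_and]
      have hprops : ∀ kw ∈ pvDangerousA,
          kw ≠ [] ∧ ' ' ∉ kw ∧ PySem.Chars.startswith kw pvSELECT = false := by decide
      have htokens : ∀ w ∈ (t0 :: rest), w ≠ [] ∧ ' ' ∉ w := by
        intro w hw
        obtain ⟨h1, h2⟩ := hust w hw
        exact ⟨h1, fun hmem => absurd (h2 ' ' hmem) (by decide)⟩
      have hany : (pvDangerousA.any fun kw =>
            PySem.Chars.isIn ((' ' :: kw) ++ [' ']) (PySem.Chars.join [' '] (t0 :: rest))
            || PySem.Chars.endswith (PySem.Chars.join [' '] (t0 :: rest)) (' ' :: kw))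
          = pvDangerousA.any fun kw => (t0 :: rest).contains kw := by
        apply PySem.List.any_congr_mem
        intro kw hkw
        obtain ⟨hk1, hk2, hk3⟩ := hprops kw hkw
        rw [Bool.eq_iff_iff, Bool.or_eq_true, PySem.Chars.isIn_iff_infix,
          PySem.Chars.endswith_iff, List.contains_eq_mem, decide_eq_true_eq]
        rw [pv_danger_aux kw hk2 (t0 :: rest) (by simp) htokens]
        simp only [List.tail_cons]
        constructor
        · exact List.mem_cons_of_mem t0
        · intro h
          rcases List.mem_cons.mp h with rfl | h
          · rw [hk3] at hsw; exact absurd hsw (by simp)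
          · exact h
      rw [hany]
      have hB : PySem.Set.isdisjoint pvDangerousB (t0 :: rest)
          = !(pvDangerousA.any fun kw => (t0 :: rest).contains kw) := rfl
      rw [hB]
      cases h : pvDangerousA.any fun kw => (t0 :: rest).contains kw
      · simp
      · simp
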